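-- pv_equiv track=rewrite | github.com/elliajen/pyworks | day27/data_list/find_same_name.py | find_same_name
-- ===== SOURCE A (Python) =====
-- def find_same_name(li):
--     same_name = []
--     n = len(li)
--     for i in range(0, n-1):
--         for j in range(i+1, n):
--             if li[i] == li[j]:
--                 same_name.append(li[j])
--     return same_name
-- ===== SOURCE B (Python) =====
-- def find_same_name(li):
--     # Count all occurrences once, then emit each name by its remaining-duplicate count.
--     counts = {}
--     for x in li:
--         counts[x] = counts.get(x, 0) + 1
--     res = []
--     for x in li:
--         c = counts[x] - 1
--         counts[x] = c
--         res.extend([x] * c)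
--     return res
-- ===== Notes on version B (the rewrite author's own statement) =====
-- stated objective: alternative
-- what changed: Replaced the O(n^2) nested index scan by a single hash-counter pass: count every name once, then for each position append the name as many times as it still occurs later; total work is O(n + output), though on duplicate-heavy inputs the output itself is quadratic so the measured gain is a constant factor.
import Mathlib
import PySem

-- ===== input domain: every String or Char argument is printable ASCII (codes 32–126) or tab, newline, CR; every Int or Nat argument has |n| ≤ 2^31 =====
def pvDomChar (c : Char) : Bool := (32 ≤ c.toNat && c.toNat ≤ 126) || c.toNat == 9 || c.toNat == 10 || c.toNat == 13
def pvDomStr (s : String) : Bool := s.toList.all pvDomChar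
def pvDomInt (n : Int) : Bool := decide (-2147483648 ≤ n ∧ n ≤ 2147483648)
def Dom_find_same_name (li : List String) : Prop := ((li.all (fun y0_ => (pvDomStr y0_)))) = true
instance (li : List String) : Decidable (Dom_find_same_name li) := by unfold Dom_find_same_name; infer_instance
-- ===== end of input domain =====

-- B replaces A's nested index scan by a single counter pass (count every name once, then
-- emit each name by its remaining later-duplicate count); same return value everywhere.

-- ===== PORT A =====
def find_same_name (li : List String) : List String :=
  let n : Int := li.length
  (PySem.List.pyRange 0 (n - 1) 1).foldl (fun same_name i =>
    (PySem.List.pyRange (i + 1) n 1).foldl (fun same_name j =>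
      if PySem.List.pyGetD li i "" = PySem.List.pyGetD li j ""
      then same_name ++ [PySem.List.pyGetD li j ""]
      else same_name) same_name) []

-- ===== PORT B =====
def find_same_name_alt (li : List String) : List String :=
  let counts := li.foldl (fun d x => d.insert x (d.getD x 0 + 1)) (PySem.Dict.empty : PySem.Dict String Int)
  (li.foldl (fun (st : PySem.Dict String Int × List String) x =>
      let c := st.1.getD x 0 - 1
      (st.1.insert x c, st.2 ++ List.replicate c.toNat x)) (counts, ([] : List String))).2

-- ===== PRECONDITION & SPEC =====
def Spec_find_same_name (li : List String) (out : List String) : Prop := out = find_same_name_alt li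
instance (li : List String) (out : List String) : Decidable (Spec_find_same_name li out) := by unfold Spec_find_same_name; infer_instance

-- ===== CLAIM (what is proved, stated in full; the proofs are below) =====
def Claim_equal_find_same_name : Prop := ∀ (li : List String), Dom_find_same_name li → Spec_find_same_name li (find_same_name li)

-- ===== LEMMAS AND PROOFS =====

-- canonical form of the result: each position's value, repeated once per later equal occurrence
def canonDup : List String → List String
  | [] => []
  | x :: rest => List.replicate (rest.count x) x ++ canonDup rest

theorem filter_decide_eq_replicate (a : String) (l : List String) :
    l.filter (fun v => decide (a = v)) = List.replicate (l.count a) a := by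
  have h : ∀ v, (decide (a = v)) = (v == a) := by
    intro v; by_cases h : a = v
    · simp [h]
    · have h2 : ¬ v = a := fun hv => h hv.symm
      simp [h, h2]
  rw [List.filter_congr (by intro v _; rw [h])]
  simp [List.filter_beq]

theorem A_flat (li : List String) :
    find_same_name li =
      (List.range (li.length - 1)).flatMap
        (fun k => (li.drop (k + 1)).filter (fun v => decide (li.getD k "" = v))) := by
  unfold find_same_name
  simp only []
  rw [PySem.List.foldl_congr_mem (g := fun acc i =>
      acc ++ ((li.drop (i+1).toNat).filter (fun v => decide (PySem.List.pyGetD li i "" = v))))]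
  · rw [PySem.List.foldl_append_eq_flatMap, PySem.List.pyRange_one, List.flatMap_map]
    simp only [List.nil_append]
    have hlen : ((li.length:Int) - 1 - 0).toNat = li.length - 1 := by omega
    rw [hlen]
    apply List.flatMap_congr
    intro k hk
    have h2 : (0:Int) + (k:Int) = ((k:Nat):Int) := by omega
    have h3 : ((k:Int) + 1).toNat = k + 1 := by omega
    simp only [h2, h3, PySem.List.pyGetD_natCast]
  · intro acc i hi
    have h0 : (0:Int) ≤ i := (PySem.List.mem_pyRange_one.1 hi).1
    rw [PySem.List.foldl_pyRange_pyGetD' li "" (fun acc v =>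
        if PySem.List.pyGetD li i "" = v then acc ++ [v] else acc) acc (by omega)]
    rw [PySem.List.foldl_append_ite_eq_filter]

theorem key_canon (li : List String) :
    (List.range (li.length - 1)).flatMap
        (fun k => (li.drop (k + 1)).filter (fun v => decide (li.getD k "" = v))) = canonDup li := by
  induction li with
  | nil => simp [canonDup]
  | cons x rest ih =>
    show (List.range rest.length).flatMap _ = _
    cases rest with
    | nil => simp [canonDup]
    | cons y t =>
      rw [show (y :: t).length = t.length + 1 from rfl,
          List.range_succ_eq_map, List.flatMap_cons, List.flatMap_map]
      calc ((x :: y :: t).drop 1).filter (fun v => decide ((x :: y :: t).getD 0 "" = v)) ++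
            (List.range (y :: t).length.pred).flatMap
              (fun k => ((x :: y :: t).drop (k.succ + 1)).filter (fun v => decide ((x :: y :: t).getD k.succ "" = v)))
          = (y :: t).filter (fun v => decide (x = v)) ++
            (List.range ((y :: t).length - 1)).flatMap
              (fun k => ((y :: t).drop (k + 1)).filter (fun v => decide ((y :: t).getD k "" = v))) := by
            rfl
        _ = canonDup (x :: y :: t) := by
            rw [ih, filter_decide_eq_replicate]
            rfl

theorem B_loop (l : List String) (d : PySem.Dict String Int) (acc : List String)
    (hd : ∀ x, d.getD x 0 = (l.count x : Int)) :
    (l.foldl (fun (st : PySem.Dict String Int × List String) x =>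
      let c := st.1.getD x 0 - 1
      (st.1.insert x c, st.2 ++ List.replicate c.toNat x)) (d, acc)).2 = acc ++ canonDup l := by
  induction l generalizing d acc with
  | nil => simp [canonDup]
  | cons x t ih =>
    simp only [List.foldl_cons]
    have hx : d.getD x 0 = (t.count x : Int) + 1 := by
      rw [hd x]; simp
    have hd' : ∀ y, ((d.insert x (d.getD x 0 - 1)).getD y 0) = (t.count y : Int) := by
      intro y
      rw [PySem.Dict.getD_insert]
      by_cases hy : y = x
      · simp [hy, hx]
      · have hxy : ¬ x = y := fun hh => hy hh.symm
        simp [hxy, hd y, hy]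
    rw [ih _ _ hd']
    simp [canonDup, hx]

theorem B_canon (li : List String) : find_same_name_alt li = canonDup li := by
  unfold find_same_name_alt
  simp only []
  rw [B_loop]
  · simp
  · intro x
    rw [PySem.Dict.getD_foldl_insert_add_one]
    simp

-- ===== VERDICT (by name: the statement is the Claim_ definition above) =====
theorem find_same_name_spec : Claim_equal_find_same_name := by
  intro li _
  show _ = _
  rw [A_flat, key_canon, B_canon]
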